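-- pv_equiv track=rewrite | github.com/guillaumehuet/AdventOfCode | 2018/15_2/solve.py | backtrack
-- ===== SOURCE A (Python) =====
-- def around(pos):
--   y = pos[0]
--   x = pos[1]
--   return ((y - 1, x), (y, x - 1), (y, x + 1), (y + 1, x))
--
-- def boundary(origin, monsters, terrain, visited):
--   result = set()
--   for pos in around(origin):
--     if terrain[pos[0]][pos[1]] and pos not in monsters and pos not in visited:
--       result.add(pos)
--   return result
--
-- def backtrack(origin, destination, monsters, terrain):
--   if destination in around(origin):
--     return destination
--   visited = set()
--   position = destination
--   visited.add(position)
--   distance = 0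
--   nextBoundary = boundary(position, monsters, terrain, visited)
--   result = []
--   stopLoop = False
--   while nextBoundary and not stopLoop:
--     distance += 1
--     currBoundary = nextBoundary
--     nextBoundary = set()
--     for position in currBoundary:
--       if position in around(origin):
--         stopLoop = True
--         result.append(position)
--       nextBoundary |= boundary(position, monsters, terrain, visited)
--     visited |= currBoundary
--   return min(result)
-- ===== SOURCE B (Python) =====
-- def around(pos):
--   y, x = pos
--   return ((y - 1, x), (y, x - 1), (y, x + 1), (y + 1, x))
--
-- def backtrack(origin, destination, monsters, terrain):
--   adj = around(origin)
--   if destination in adj: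
--     return destination
--   # standard FIFO BFS from destination filling a shortest-distance map
--   dist = {destination: 0}
--   frontier = [destination]
--   d = 0
--   while frontier:
--     d += 1
--     nxt = []
--     for pos in frontier:
--       for nb in around(pos):
--         if nb not in dist and terrain[nb[0]][nb[1]] and nb not in monsters:
--           dist[nb] = d
--           nxt.append(nb)
--     frontier = nxt
--   candidates = [c for c in adj if c in dist]
--   best = min(dist[c] for c in candidates)  # ValueError on empty, as A's min([])
--   return min(c for c in candidates if dist[c] == best)
-- ===== Notes on version B (the rewrite author's own statement) =====
-- stated objective: idiomatic
-- what changed: A's wave sweep with overlapping frontiers, a stop flag and an early-exit result list is replaced by a standard FIFO BFS that fills a complete shortest-distance dict and then scans the origin-adjacent cells for the minimal-distance, lexicographically least one.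
import Mathlib
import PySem

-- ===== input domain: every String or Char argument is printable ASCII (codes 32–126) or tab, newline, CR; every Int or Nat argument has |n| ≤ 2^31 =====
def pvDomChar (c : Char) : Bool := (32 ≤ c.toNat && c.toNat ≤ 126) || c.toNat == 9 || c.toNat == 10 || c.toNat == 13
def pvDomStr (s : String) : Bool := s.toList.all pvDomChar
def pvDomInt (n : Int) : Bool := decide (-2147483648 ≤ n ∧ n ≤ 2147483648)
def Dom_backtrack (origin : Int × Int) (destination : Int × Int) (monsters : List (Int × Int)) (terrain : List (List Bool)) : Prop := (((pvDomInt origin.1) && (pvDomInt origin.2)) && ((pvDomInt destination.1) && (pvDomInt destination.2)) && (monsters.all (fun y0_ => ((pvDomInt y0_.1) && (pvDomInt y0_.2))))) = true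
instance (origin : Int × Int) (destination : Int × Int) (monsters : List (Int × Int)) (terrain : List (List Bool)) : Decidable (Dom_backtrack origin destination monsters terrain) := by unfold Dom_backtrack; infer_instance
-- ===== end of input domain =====

-- B replaces A's early-exit wave sweep (overlapping frontiers, stop-flag, result list) by a standard
-- FIFO BFS that fills a complete shortest-distance map and then scans the origin-adjacent cells
-- (objective: simpler/idiomatic; not claimed faster).

-- ===== PORT A =====
-- helper `around` is defined identically in both Python sources; `terrainAt` is Python's
-- `terrain[p[0]][p[1]]` (negative indices wrap); the `.getD false` branch is an IndexError in
-- Python and is unreachable inside Pre_backtrack.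
def around (p : Int × Int) : List (Int × Int) :=
  [(p.1 - 1, p.2), (p.1, p.2 - 1), (p.1, p.2 + 1), (p.1 + 1, p.2)]

def terrainAt (terrain : List (List Bool)) (c : Int × Int) : Bool :=
  ((PySem.List.pyGet? terrain c.1).bind (fun r => PySem.List.pyGet? r c.2)).getD false

-- termination fuel for both while-loops: more than the number of distinct cells BFS can ever visit
-- (a visitable cell has row index in [-H,H) and column index in [-W,W) for W the longest row);
-- inside Pre_backtrack both loops finish before the fuel runs out, so it is only a bound.
def gridFuel (terrain : List (List Bool)) : Nat :=
  4 * terrain.length * (terrain.foldl (fun m r => max m r.length) 0) + 2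

def boundary (origin : Int × Int) (monsters : List (Int × Int)) (terrain : List (List Bool))
    (visited : PySem.Set (Int × Int)) : PySem.Set (Int × Int) :=
  (around origin).foldl
    (fun result pos =>
      if terrainAt terrain pos && !(monsters.contains pos) && !(visited.contains pos)
      then PySem.Set.add result pos else result)
    PySem.Set.empty

def backtrackLoop (origin : Int × Int) (monsters : List (Int × Int)) (terrain : List (List Bool)) :
    Nat → PySem.Set (Int × Int) → PySem.Set (Int × Int) → Int → List (Int × Int) → List (Int × Int)
  | 0, _, _, _, result => result
  | fuel + 1, visited, nextBoundary, distance, result =>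
    if nextBoundary.isEmpty then result
    else
      let st := nextBoundary.foldl
        (fun (st : PySem.Set (Int × Int) × List (Int × Int) × Bool) position =>
          let st := if (around origin).contains position then (st.1, st.2.1 ++ [position], true) else st
          (PySem.Set.union st.1 (boundary position monsters terrain visited), st.2.1, st.2.2))
        (PySem.Set.empty, result, false)
      if st.2.2 then st.2.1
      else backtrackLoop origin monsters terrain fuel
        (PySem.Set.union visited nextBoundary) st.1 (distance + 1) st.2.1

def backtrack (origin : Int × Int) (destination : Int × Int) (monsters : List (Int × Int)) (terrain : List (List Bool)) : Int × Int :=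
  if (around origin).contains destination then destination
  else
    let visited : PySem.Set (Int × Int) := PySem.Set.add PySem.Set.empty destination
    let nextBoundary := boundary destination monsters terrain visited
    let result := backtrackLoop origin monsters terrain (gridFuel terrain) visited nextBoundary 0 []
    -- min(result); an empty result is Python's ValueError, excluded by Pre_backtrack
    (PySem.List.min2? result (fun c => c.1) (fun c => c.2)).getD (0, 0)

-- ===== PORT B =====
def backtrackAltLoop (monsters : List (Int × Int)) (terrain : List (List Bool)) :
    Nat → PySem.Dict (Int × Int) Int → List (Int × Int) → Int → PySem.Dict (Int × Int) Int
  | 0, dist, _, _ => dist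
  | fuel + 1, dist, frontier, d =>
    if frontier.isEmpty then dist
    else
      let st := frontier.foldl
        (fun st pos =>
          (around pos).foldl
            (fun (st : PySem.Dict (Int × Int) Int × List (Int × Int)) nb =>
              if !st.1.contains nb && terrainAt terrain nb && !(monsters.contains nb)
              then (st.1.insert nb (d + 1), st.2 ++ [nb]) else st)
            st)
        (dist, ([] : List (Int × Int)))
      backtrackAltLoop monsters terrain fuel st.1 st.2 (d + 1)

def backtrack_alt (origin : Int × Int) (destination : Int × Int) (monsters : List (Int × Int)) (terrain : List (List Bool)) : Int × Int :=
  let adj := around origin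
  if adj.contains destination then destination
  else
    let dist := backtrackAltLoop monsters terrain (gridFuel terrain)
      ((PySem.Dict.empty).insert destination 0) [destination] 0
    let candidates := adj.filter (fun c => dist.contains c)
    -- min over the candidate distances; empty is Python's ValueError, excluded by Pre_backtrack
    let best := (PySem.List.min? (candidates.map (fun c => dist.getD c 0)) (fun v => v)).getD 0
    (PySem.List.min2? (candidates.filter (fun c => dist.getD c 0 == best)) (fun c => c.1) (fun c => c.2)).getD (0, 0)

-- ===== PRECONDITION & SPEC =====
-- Pre_backtrack states exactly when the Python returns a value: either the fast path fires, or
-- (1) every terrain access made while exploring from `destination` is in range (no IndexError; the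
-- explored region is a reachability closure — "which cells BFS can reach" has no simpler closed
-- form) and (2) some origin-adjacent cell is reachable (else `min([])` raises ValueError).
-- It excludes inputs where A's early exit masks an IndexError that full exploration hits: there A
-- returns a value while B raises IndexError (see claim cites).
def cellFree (monsters : List (Int × Int)) (terrain : List (List Bool)) (c : Int × Int) : Bool :=
  terrainAt terrain c && !(monsters.contains c)

def accessOk (terrain : List (List Bool)) (c : Int × Int) : Bool :=
  ((PySem.List.pyGet? terrain c.1).bind (fun r => PySem.List.pyGet? r c.2)).isSome

def reachStep (monsters : List (Int × Int)) (terrain : List (List Bool))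
    (s : PySem.Set (Int × Int)) : PySem.Set (Int × Int) :=
  s.foldl (fun acc c =>
    (around c).foldl (fun acc nb =>
      if cellFree monsters terrain nb then PySem.Set.add acc nb else acc) acc) s

def reachSet (destination : Int × Int) (monsters : List (Int × Int)) (terrain : List (List Bool)) :
    PySem.Set (Int × Int) :=
  (reachStep monsters terrain)^[gridFuel terrain] (PySem.Set.add PySem.Set.empty destination)

def Pre_backtrack (origin : Int × Int) (destination : Int × Int) (monsters : List (Int × Int)) (terrain : List (List Bool)) : Prop :=
  (around origin).contains destination = true ∨
    (((reachSet destination monsters terrain).all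
        (fun c => (around c).all (fun nb => accessOk terrain nb))) = true ∧
     ((around origin).any (fun c => (reachSet destination monsters terrain).contains c)) = true)

instance (origin : Int × Int) (destination : Int × Int) (monsters : List (Int × Int)) (terrain : List (List Bool)) : Decidable (Pre_backtrack origin destination monsters terrain) := by
  unfold Pre_backtrack; infer_instance

def pvWitness_backtrack : (Int × Int) × (Int × Int) × (List (Int × Int)) × List (List Bool) :=
  ((2, 3), (1, 1), [],
   [[false, false, false, false, false],
    [false, true, true, true, false],
    [false, false, false, false, false]])

def Spec_backtrack (origin : Int × Int) (destination : Int × Int) (monsters : List (Int × Int)) (terrain : List (List Bool)) (out : Int × Int) : Prop := out = backtrack_alt origin destination monsters terrain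
instance (origin : Int × Int) (destination : Int × Int) (monsters : List (Int × Int)) (terrain : List (List Bool)) (out : Int × Int) : Decidable (Spec_backtrack origin destination monsters terrain out) := by unfold Spec_backtrack; infer_instance

-- ===== CLAIM (what is proved, stated in full; the proofs are below) =====
def Claim_equal_backtrack : Prop := ∀ (origin : Int × Int) (destination : Int × Int) (monsters : List (Int × Int)) (terrain : List (List Bool)), Dom_backtrack origin destination monsters terrain → Pre_backtrack origin destination monsters terrain → Spec_backtrack origin destination monsters terrain (backtrack origin destination monsters terrain)

-- ===== LEMMAS AND PROOFS =====

-- abstract BFS model: Sm n = cells reachable from `destination` in ≤ n steps, Lm n = exactly n steps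
def nbrsF (s : Finset (Int × Int)) : Finset (Int × Int) :=
  s.biUnion (fun c => (around c).toFinset)

def Sm (destination : Int × Int) (monsters : List (Int × Int)) (terrain : List (List Bool)) : Nat → Finset (Int × Int)
  | 0 => {destination}
  | n + 1 => Sm destination monsters terrain n ∪
      (nbrsF (Sm destination monsters terrain n)).filter (fun c => cellFree monsters terrain c = true)

def Lm (destination : Int × Int) (monsters : List (Int × Int)) (terrain : List (List Bool)) : Nat → Finset (Int × Int)
  | 0 => {destination}
  | n + 1 => Sm destination monsters terrain (n + 1) \ Sm destination monsters terrain n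

theorem S_mono (dst : Int × Int) (ms : List (Int × Int)) (tr : List (List Bool)) {m n : Nat}
    (h : m ≤ n) : Sm dst ms tr m ⊆ Sm dst ms tr n := by
  induction h with
  | refl => exact subset_rfl
  | step h ih =>
    exact fun x hx => by simp only [Sm]; exact Finset.mem_union_left _ (ih hx)

theorem L_subset_S (dst : Int × Int) (ms : List (Int × Int)) (tr : List (List Bool)) (n : Nat) :
    Lm dst ms tr n ⊆ Sm dst ms tr n := by
  cases n with
  | zero => exact subset_rfl
  | succ m => exact fun x hx => (Finset.mem_sdiff.mp hx).1

theorem S_succ_eq_union_L (dst : Int × Int) (ms : List (Int × Int)) (tr : List (List Bool)) (n : Nat) :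
    Sm dst ms tr (n + 1) = Sm dst ms tr n ∪ Lm dst ms tr (n + 1) := by
  have h := S_mono dst ms tr (Nat.le_succ n)
  simp only [Lm]
  exact (Finset.union_sdiff_of_subset h).symm

theorem mem_S_succ (dst : Int × Int) (ms : List (Int × Int)) (tr : List (List Bool)) (n : Nat)
    {p c : Int × Int} (hp : p ∈ Sm dst ms tr n) (hc : c ∈ around p)
    (hf : cellFree ms tr c = true) : c ∈ Sm dst ms tr (n + 1) := by
  have h : c ∈ (nbrsF (Sm dst ms tr n)).filter (fun c => cellFree ms tr c = true) := by
    rw [Finset.mem_filter]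
    refine ⟨?_, hf⟩
    simp only [nbrsF, Finset.mem_biUnion, List.mem_toFinset]
    exact ⟨p, hp, hc⟩
  show c ∈ Sm dst ms tr n ∪ (nbrsF (Sm dst ms tr n)).filter (fun c => cellFree ms tr c = true)
  exact Finset.mem_union_right _ h

theorem mem_S_iff (dst : Int × Int) (ms : List (Int × Int)) (tr : List (List Bool)) (n : Nat)
    (c : Int × Int) : c ∈ Sm dst ms tr n ↔ ∃ j ≤ n, c ∈ Lm dst ms tr j := by
  induction n with
  | zero =>
    simp only [Sm, Nat.le_zero]
    constructor
    · intro h; exact ⟨0, rfl, h⟩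
    · rintro ⟨j, rfl, h⟩; exact h
  | succ m ih =>
    rw [S_succ_eq_union_L, Finset.mem_union, ih]
    constructor
    · rintro (⟨j, hj, hc⟩ | hc)
      · exact ⟨j, Nat.le_succ_of_le hj, hc⟩
      · exact ⟨m + 1, le_rfl, hc⟩
    · rintro ⟨j, hj, hc⟩
      rcases Nat.lt_or_ge j (m + 1) with hlt | hge
      · exact Or.inl ⟨j, Nat.lt_succ_iff.mp hlt, hc⟩
      · have : j = m + 1 := by omega
        exact Or.inr (this ▸ hc)


theorem L_disjoint (dst : Int × Int) (ms : List (Int × Int)) (tr : List (List Bool)) {j j' : Nat}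
    {c : Int × Int} (h : c ∈ Lm dst ms tr j) (h' : c ∈ Lm dst ms tr j') : j = j' := by
  by_contra hne
  rcases Nat.lt_or_ge j j' with hlt | hge
  · cases j' with
    | zero => omega
    | succ m =>
      have h1 : c ∈ Sm dst ms tr m := S_mono dst ms tr (by omega) (L_subset_S dst ms tr j h)
      exact (Finset.mem_sdiff.mp h').2 h1
  · have hlt : j' < j := by omega
    cases j with
    | zero => omega
    | succ m =>
      have h1 : c ∈ Sm dst ms tr m := S_mono dst ms tr (by omega) (L_subset_S dst ms tr j' h')
      exact (Finset.mem_sdiff.mp h).2 h1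

theorem L_succ_eq (dst : Int × Int) (ms : List (Int × Int)) (tr : List (List Bool)) (n : Nat) :
    Lm dst ms tr (n + 1) =
      ((nbrsF (Lm dst ms tr n)).filter (fun c => cellFree ms tr c = true)) \ Sm dst ms tr n := by
  ext c
  simp only [Lm, Finset.mem_sdiff, Finset.mem_filter, nbrsF, Finset.mem_biUnion, List.mem_toFinset]
  constructor
  · rintro ⟨hc1, hc2⟩
    have hc1' : c ∈ Sm dst ms tr n ∨ c ∈ (nbrsF (Sm dst ms tr n)).filter (fun c => cellFree ms tr c = true) := by
      have := hc1; simp only [Sm, Finset.mem_union] at this; exact this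
    rcases hc1' with h | h
    · exact absurd h hc2
    simp only [Finset.mem_filter, nbrsF, Finset.mem_biUnion, List.mem_toFinset] at h
    obtain ⟨⟨p, hp, hcp⟩, hfree⟩ := h
    refine ⟨⟨⟨p, ?_, hcp⟩, hfree⟩, hc2⟩
    cases n with
    | zero =>
      simp only [Sm, Finset.mem_singleton] at hp
      simp [hp]
    | succ m =>
      -- p ∈ Sm (m+1); if p ∈ Sm m then c ∈ Sm (m+1) contradicting hc2
      simp only [Finset.mem_sdiff]
      refine ⟨hp, fun hpm => hc2 ?_⟩
      have : c ∈ (nbrsF (Sm dst ms tr m)).filter (fun c => cellFree ms tr c = true) := by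
        simp only [Finset.mem_filter, nbrsF, Finset.mem_biUnion, List.mem_toFinset]
        exact ⟨⟨p, hpm, hcp⟩, hfree⟩
      simp only [Sm, Finset.mem_union]
      exact Or.inr this
  · rintro ⟨⟨⟨p, hp, hcp⟩, hfree⟩, hns⟩
    refine ⟨?_, hns⟩
    have hpS : p ∈ Sm dst ms tr n := L_subset_S dst ms tr n hp
    simp only [Sm, Finset.mem_union, Finset.mem_filter, nbrsF, Finset.mem_biUnion, List.mem_toFinset]
    exact Or.inr ⟨⟨p, hpS, hcp⟩, hfree⟩

theorem L_empty_mono (dst : Int × Int) (ms : List (Int × Int)) (tr : List (List Bool)) {m n : Nat}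
    (h : Lm dst ms tr m = ∅) (hmn : m ≤ n) : Lm dst ms tr n = ∅ := by
  induction hmn with
  | refl => exact h
  | step h2 ih =>
    rw [L_succ_eq, ih]
    simp [nbrsF]

theorem L_nonempty_of_le (dst : Int × Int) (ms : List (Int × Int)) (tr : List (List Bool)) {k n : Nat}
    (hk : (Lm dst ms tr k).Nonempty) (hn : n ≤ k) : (Lm dst ms tr n).Nonempty := by
  rcases Finset.eq_empty_or_nonempty (Lm dst ms tr n) with he | h
  · rw [L_empty_mono dst ms tr he hn] at hk
    exact absurd hk (by simp)
  · exact h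

def intRange (n : Nat) : Finset Int := (Finset.range (2 * n)).image (fun k : Nat => (k : Int) - n)

theorem mem_intRange {n : Nat} {x : Int} : x ∈ intRange n ↔ -(n : Int) ≤ x ∧ x < n := by
  simp only [intRange, Finset.mem_image, Finset.mem_range]
  constructor
  · rintro ⟨k, hk, rfl⟩; omega
  · rintro ⟨h1, h2⟩; exact ⟨(x + n).toNat, by omega, by omega⟩

theorem card_intRange (n : Nat) : (intRange n).card ≤ 2 * n :=
  le_trans Finset.card_image_le (le_of_eq (Finset.card_range _))

def GridF (tr : List (List Bool)) : Finset (Int × Int) :=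
  (intRange tr.length) ×ˢ (intRange (tr.foldl (fun m r => max m r.length) 0))

theorem card_GridF (tr : List (List Bool)) :
    (GridF tr).card ≤ 4 * tr.length * (tr.foldl (fun m r => max m r.length) 0) := by
  have h := Finset.card_product (intRange tr.length) (intRange (tr.foldl (fun m r => max m r.length) 0))
  calc (GridF tr).card = _ := h
    _ ≤ (2 * tr.length) * (2 * (tr.foldl (fun m r => max m r.length) 0)) :=
        Nat.mul_le_mul (card_intRange _) (card_intRange _)
    _ = 4 * tr.length * (tr.foldl (fun m r => max m r.length) 0) := by ring

theorem free_mem_grid (ms : List (Int × Int)) (tr : List (List Bool)) {c : Int × Int}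
    (h : cellFree ms tr c = true) : c ∈ GridF tr := by
  have hterr : terrainAt tr c = true := by
    simp only [cellFree, Bool.and_eq_true] at h; exact h.1
  unfold terrainAt at hterr
  rcases hrow : PySem.List.pyGet? tr c.1 with _ | row
  · rw [hrow] at hterr; simp at hterr
  rw [hrow] at hterr
  simp only [Option.bind_some] at hterr
  rcases hcell : PySem.List.pyGet? row c.2 with _ | b
  · rw [hcell] at hterr; simp at hterr
  have h1 : PySem.Raise.InRange tr.length c.1 := by
    by_contra hn
    rw [(PySem.List.pyGet?_eq_none_iff tr c.1).mpr hn] at hrow; simp at hrow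
  have h2 : PySem.Raise.InRange row.length c.2 := by
    by_contra hn
    rw [(PySem.List.pyGet?_eq_none_iff row c.2).mpr hn] at hcell; simp at hcell
  have hmem : row ∈ tr := PySem.List.mem_of_pyGet?_eq_some tr hrow
  have hlen : row.length ≤ tr.foldl (fun m r => max m r.length) 0 :=
    (PySem.List.le_foldl_max_nat tr List.length 0).2 row hmem
  unfold PySem.Raise.InRange at h1 h2
  simp only [GridF, Finset.mem_product, mem_intRange]
  omega

theorem S_subset_grid (dst : Int × Int) (ms : List (Int × Int)) (tr : List (List Bool)) (n : Nat) :
    Sm dst ms tr n ⊆ insert dst (GridF tr) := by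
  induction n with
  | zero => intro c hc; simp only [Sm, Finset.mem_singleton] at hc; simp [hc]
  | succ m ih =>
    intro c hc
    simp only [Sm, Finset.mem_union, Finset.mem_filter] at hc
    rcases hc with h | ⟨_, hfree⟩
    · exact ih h
    · exact Finset.mem_insert_of_mem (free_mem_grid ms tr hfree)

theorem card_S_ge (dst : Int × Int) (ms : List (Int × Int)) (tr : List (List Bool)) (n : Nat)
    (h : ∀ j ≤ n, (Lm dst ms tr j).Nonempty) : n + 1 ≤ (Sm dst ms tr n).card := by
  induction n with
  | zero => simp [Sm]
  | succ m ih =>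
    have h1 : m + 1 ≤ (Sm dst ms tr m).card := ih (fun j hj => h j (by omega))
    have h2 : Sm dst ms tr m ⊂ Sm dst ms tr (m + 1) := by
      obtain ⟨c, hc⟩ := h (m + 1) le_rfl
      refine Finset.ssubset_iff_of_subset (S_mono dst ms tr (Nat.le_succ m)) |>.mpr ?_
      exact ⟨c, L_subset_S dst ms tr (m+1) hc, (Finset.mem_sdiff.mp hc).2⟩
    have := Finset.card_lt_card h2
    omega

theorem L_gridFuel_empty (dst : Int × Int) (ms : List (Int × Int)) (tr : List (List Bool)) :
    Lm dst ms tr (gridFuel tr - 1) = ∅ := by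
  by_contra hne
  have hne' : (Lm dst ms tr (gridFuel tr - 1)).Nonempty := Finset.nonempty_iff_ne_empty.mpr hne
  have hall : ∀ j ≤ gridFuel tr - 1, (Lm dst ms tr j).Nonempty :=
    fun j hj => L_nonempty_of_le dst ms tr hne' hj
  have h1 := card_S_ge dst ms tr (gridFuel tr - 1) hall
  have h2 : (Sm dst ms tr (gridFuel tr - 1)).card ≤ (insert dst (GridF tr)).card :=
    Finset.card_le_card (S_subset_grid dst ms tr _)
  have h3 : (insert dst (GridF tr)).card ≤ (GridF tr).card + 1 := Finset.card_insert_le _ _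
  have h4 := card_GridF tr
  have h5 : gridFuel tr = 4 * tr.length * (tr.foldl (fun m r => max m r.length) 0) + 2 := rfl
  omega

-- port-side characterizations
theorem mem_boundary (p : Int × Int) (ms : List (Int × Int)) (tr : List (List Bool))
    (visited : PySem.Set (Int × Int)) (c : Int × Int) :
    c ∈ boundary p ms tr visited ↔ c ∈ around p ∧ cellFree ms tr c = true ∧ c ∉ visited := by
  unfold boundary
  rw [PySem.List.foldl_if_eq_foldl_filter]
  rw [show ∀ (l : List (Int × Int)), l.foldl PySem.Set.add PySem.Set.empty = PySem.Set.update PySem.Set.empty l from fun l => rfl]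
  rw [PySem.Set.mem_update]
  simp only [PySem.Set.empty, List.not_mem_nil, false_or, List.mem_filter, cellFree,
    Bool.and_eq_true, Bool.not_eq_true', PySem.Set.contains_eq_listContains,
    List.contains_eq_mem, decide_eq_false_iff_not]

theorem nodup_boundary (p : Int × Int) (ms : List (Int × Int)) (tr : List (List Bool))
    (visited : PySem.Set (Int × Int)) : (boundary p ms tr visited).Nodup := by
  unfold boundary
  rw [PySem.List.foldl_if_eq_foldl_filter]
  rw [show ∀ (l : List (Int × Int)), l.foldl PySem.Set.add PySem.Set.empty = PySem.Set.update PySem.Set.empty l from fun l => rfl]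
  exact PySem.Set.nodup_update _ _ List.nodup_nil

-- Pre_-side reachability closure agrees with the model
theorem mem_reachStep (ms : List (Int × Int)) (tr : List (List Bool)) (s : PySem.Set (Int × Int))
    (c : Int × Int) :
    c ∈ reachStep ms tr s ↔ c ∈ s ∨ ∃ p ∈ s, c ∈ around p ∧ cellFree ms tr c = true := by
  unfold reachStep
  have aux : ∀ (l : List (Int × Int)) (acc : PySem.Set (Int × Int)),
      c ∈ l.foldl (fun acc p => (around p).foldl
        (fun acc nb => if cellFree ms tr nb then PySem.Set.add acc nb else acc) acc) acc ↔
      c ∈ acc ∨ ∃ p ∈ l, c ∈ around p ∧ cellFree ms tr c = true := by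
    intro l
    induction l with
    | nil => simp
    | cons x t ih =>
      intro acc
      simp only [List.foldl_cons, ih]
      rw [PySem.List.foldl_if_eq_foldl_filter]
      rw [show ∀ (l : List (Int × Int)) (a : PySem.Set (Int × Int)), l.foldl PySem.Set.add a = PySem.Set.update a l from fun l a => rfl]
      rw [PySem.Set.mem_update]
      constructor
      · rintro ((h | h) | ⟨p, hp, hc, hf⟩)
        · exact Or.inl h
        · rw [List.mem_filter] at h
          exact Or.inr ⟨x, List.mem_cons_self, h.1, h.2⟩
        · exact Or.inr ⟨p, List.mem_cons_of_mem _ hp, hc, hf⟩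
      · rintro (h | ⟨p, hp, hc, hf⟩)
        · exact Or.inl (Or.inl h)
        · rcases List.mem_cons.mp hp with rfl | hp
          · exact Or.inl (Or.inr (List.mem_filter.mpr ⟨hc, hf⟩))
          · exact Or.inr ⟨p, hp, hc, hf⟩
  exact aux s s

theorem reach_iterate (dst : Int × Int) (ms : List (Int × Int)) (tr : List (List Bool)) (n : Nat)
    (c : Int × Int) :
    c ∈ (reachStep ms tr)^[n] (PySem.Set.add PySem.Set.empty dst) ↔ c ∈ Sm dst ms tr n := by
  induction n generalizing c with
  | zero => simp [PySem.Set.empty, PySem.Set.add, Sm]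
  | succ m ih =>
    rw [Function.iterate_succ_apply', mem_reachStep]
    simp only [Sm, Finset.mem_union, Finset.mem_filter, nbrsF, Finset.mem_biUnion, List.mem_toFinset]
    constructor
    · rintro (h | ⟨p, hp, hc, hf⟩)
      · exact Or.inl ((ih c).mp h)
      · exact Or.inr ⟨⟨p, (ih p).mp hp, hc⟩, hf⟩
    · rintro (h | ⟨⟨p, hp, hc⟩, hf⟩)
      · exact Or.inl ((ih c).mpr h)
      · exact Or.inr ⟨p, (ih p).mpr hp, hc, hf⟩

-- Python's min over (int, int) tuples picks the lexicographic least element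
def lexLe (a b : Int × Int) : Prop := a.1 < b.1 ∨ (a.1 = b.1 ∧ a.2 ≤ b.2)

theorem lexLe_refl (a : Int × Int) : lexLe a a := Or.inr ⟨rfl, le_rfl⟩

theorem lexLe_trans {a b c : Int × Int} (h1 : lexLe a b) (h2 : lexLe b c) : lexLe a c := by
  unfold lexLe at *; omega

theorem lexLe_antisymm {a b : Int × Int} (h1 : lexLe a b) (h2 : lexLe b a) : a = b := by
  unfold lexLe at *
  have h3 : a.1 = b.1 ∧ a.2 = b.2 := by omega
  exact Prod.ext h3.1 h3.2

def minStep : Option (Int × Int) → (Int × Int) → Option (Int × Int) := fun acc y =>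
  match acc with
  | none => some y
  | some m => if (decide (y.1 < m.1) || !decide (m.1 < y.1) && decide (y.2 < m.2)) = true
              then some y else some m

theorem min2?_eq_foldl (t : List (Int × Int)) :
    PySem.List.min2? t (fun c => c.1) (fun c => c.2) = t.foldl minStep none := by
  unfold PySem.List.min2? minStep
  congr 1
  funext acc y
  cases acc <;> rfl

theorem min2?_spec (xs : List (Int × Int)) (hne : xs ≠ []) :
    ∃ m, PySem.List.min2? xs (fun c => c.1) (fun c => c.2) = some m ∧ m ∈ xs ∧
      ∀ y ∈ xs, lexLe m y := by
  have aux : ∀ (l : List (Int × Int)) (a : Int × Int),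
      ∃ m, l.foldl minStep (some a) = some m ∧
        (m = a ∨ m ∈ l) ∧ lexLe m a ∧ ∀ y ∈ l, lexLe m y := by
    intro l
    induction l with
    | nil => exact fun a => ⟨a, rfl, Or.inl rfl, lexLe_refl a, by simp⟩
    | cons x t ih =>
      intro a
      simp only [List.foldl_cons]
      by_cases hc : (decide (x.1 < a.1) || !decide (a.1 < x.1) && decide (x.2 < a.2)) = true
      · rw [show minStep (some a) x = if (decide (x.1 < a.1) || !decide (a.1 < x.1) && decide (x.2 < a.2)) = true then some x else some a from rfl, if_pos hc]
        obtain ⟨m, hm, hmem, hma, hall⟩ := ih x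
        have hxa : lexLe x a := by
          simp only [Bool.or_eq_true, Bool.and_eq_true, Bool.not_eq_true', decide_eq_true_eq,
            decide_eq_false_iff_not] at hc
          unfold lexLe; omega
        refine ⟨m, hm, ?_, lexLe_trans hma hxa, ?_⟩
        · rcases hmem with rfl | h
          · exact Or.inr List.mem_cons_self
          · exact Or.inr (List.mem_cons_of_mem _ h)
        · intro y hy
          rcases List.mem_cons.mp hy with rfl | hy
          · exact hma
          · exact hall y hy
      · rw [show minStep (some a) x = if (decide (x.1 < a.1) || !decide (a.1 < x.1) && decide (x.2 < a.2)) = true then some x else some a from rfl, if_neg hc]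
        obtain ⟨m, hm, hmem, hma, hall⟩ := ih a
        have hax : lexLe a x := by
          simp only [Bool.or_eq_true, Bool.and_eq_true, Bool.not_eq_true', decide_eq_true_eq,
            decide_eq_false_iff_not, not_or, not_and] at hc
          unfold lexLe; omega
        refine ⟨m, hm, ?_, hma, ?_⟩
        · rcases hmem with rfl | h
          · exact Or.inl rfl
          · exact Or.inr (List.mem_cons_of_mem _ h)
        · intro y hy
          rcases List.mem_cons.mp hy with rfl | hy
          · exact lexLe_trans hma hax
          · exact hall y hy
  cases xs with
  | nil => exact absurd rfl hne
  | cons x t =>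
    obtain ⟨m, hm, hmem, hma, hall⟩ := aux t x
    refine ⟨m, ?_, ?_, ?_⟩
    · rw [min2?_eq_foldl, List.foldl_cons, show minStep none x = some x from rfl]
      exact hm
    · rcases hmem with rfl | h
      · exact List.mem_cons_self
      · exact List.mem_cons_of_mem _ h
    · intro y hy
      rcases List.mem_cons.mp hy with rfl | hy
      · exact hma
      · exact hall y hy

theorem min2?_congr (xs ys : List (Int × Int)) (h : ∀ c, c ∈ xs ↔ c ∈ ys) (hne : xs ≠ []) :
    PySem.List.min2? xs (fun c => c.1) (fun c => c.2) =
      PySem.List.min2? ys (fun c => c.1) (fun c => c.2) := by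
  have hyne : ys ≠ [] := by
    cases xs with
    | nil => exact absurd rfl hne
    | cons x t =>
      intro hy
      have := (h x).mp List.mem_cons_self
      rw [hy] at this; exact List.not_mem_nil this
  obtain ⟨m, hm, hmem, hall⟩ := min2?_spec xs hne
  obtain ⟨m', hm', hmem', hall'⟩ := min2?_spec ys hyne
  rw [hm, hm']
  have h1 : lexLe m m' := hall m' ((h m').mpr hmem')
  have h2 : lexLe m' m := hall' m ((h m).mp hmem)
  rw [lexLe_antisymm h1 h2]

-- one BFS round of port B: folding the neighbour list into (dist, nxt)
theorem distFold (ms : List (Int × Int)) (tr : List (List Bool)) (d : Int) :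
    ∀ (cs : List (Int × Int)) (dist : PySem.Dict (Int × Int) Int) (acc : List (Int × Int)),
    (∀ c ∈ acc, dist.contains c = true) → acc.Nodup →
    ∀ out, out = cs.foldl (fun (st : PySem.Dict (Int × Int) Int × List (Int × Int)) nb =>
        if !st.1.contains nb && terrainAt tr nb && !(ms.contains nb)
        then (st.1.insert nb d, st.2 ++ [nb]) else st) (dist, acc) →
    (∀ c, out.1.get? c =
        (if c ∈ cs ∧ cellFree ms tr c = true ∧ dist.get? c = none then some d else dist.get? c))
    ∧ (∀ c, c ∈ out.2 ↔ c ∈ acc ∨ (c ∈ cs ∧ cellFree ms tr c = true ∧ dist.get? c = none))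
    ∧ out.2.Nodup ∧ (∀ c ∈ out.2, out.1.contains c = true) := by
  intro cs
  induction cs with
  | nil =>
    intro dist acc hacc hnd out hout
    subst hout
    refine ⟨fun c => by simp, fun c => by simp, hnd, hacc⟩
  | cons x t ih =>
    intro dist acc hacc hnd out hout
    rw [List.foldl_cons] at hout
    by_cases hcond : (!dist.contains x && terrainAt tr x && !(ms.contains x)) = true
    · rw [if_pos hcond] at hout
      have hxfree : cellFree ms tr x = true := by
        simp only [Bool.and_eq_true, Bool.not_eq_true'] at hcond
        have h2 : x ∉ ms := by simpa using hcond.2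
        simp [cellFree, hcond.1.2, h2]
      have hxnone : dist.get? x = none := by
        simp only [Bool.and_eq_true, Bool.not_eq_true'] at hcond
        rw [PySem.Dict.get?_eq_none_iff_contains]
        exact hcond.1.1
      have hxacc : x ∉ acc := fun hx => by
        have := hacc x hx
        simp only [Bool.and_eq_true, Bool.not_eq_true'] at hcond
        rw [this] at hcond; simp at hcond
      have hacc' : ∀ c ∈ acc ++ [x], (dist.insert x d).contains c = true := by
        intro c hc
        rcases List.mem_append.mp hc with hc | hc
        · rw [PySem.Dict.contains_insert]
          simp [hacc c hc]
        · simp only [List.mem_singleton] at hc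
          subst hc
          exact PySem.Dict.contains_insert_self _ _ _
      have hnd' : (acc ++ [x]).Nodup := by
        rw [← List.concat_eq_append]
        exact hnd.concat hxacc
      obtain ⟨hget, hmem, hnd2, hsub⟩ := ih (dist.insert x d) (acc ++ [x]) hacc' hnd' out hout
      refine ⟨?_, ?_, hnd2, hsub⟩
      · intro c
        rw [hget c]
        by_cases hcx : c = x
        · subst hcx
          rw [PySem.Dict.get?_insert_self]
          simp [hxnone, hxfree]
        · rw [PySem.Dict.get?_insert_of_ne _ _ hcx]
          by_cases hct : c ∈ t
          · simp [hct, hcx]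
          · simp [hct, hcx]
      · intro c
        rw [hmem c]
        by_cases hcx : c = x
        · subst hcx
          simp [hxnone, hxfree]
        · rw [PySem.Dict.get?_insert_of_ne _ _ hcx]
          simp only [List.mem_append, List.mem_cons, hcx, false_or]
          tauto
    · rw [if_neg hcond] at hout
      obtain ⟨hget, hmem, hnd2, hsub⟩ := ih dist acc hacc hnd out hout
      have hfail : ∀ (hc : cellFree ms tr x = true), dist.get? x ≠ none := by
        intro hc hn
        apply hcond
        simp only [cellFree, Bool.and_eq_true, Bool.not_eq_true'] at hc
        have : dist.contains x = false := (PySem.Dict.get?_eq_none_iff_contains dist x).mp hn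
        have h2 : x ∉ ms := by simpa using hc.2
        simp [this, hc.1, h2]
      refine ⟨?_, ?_, hnd2, hsub⟩
      · intro c
        rw [hget c]
        by_cases hcx : c = x
        · subst hcx
          by_cases hfr : cellFree ms tr c = true
          · have := hfail hfr
            simp [this]
          · simp [hfr]
        · simp [hcx]
      · intro c
        rw [hmem c]
        by_cases hcx : c = x
        · subst hcx
          by_cases hfr : cellFree ms tr c = true
          · have := hfail hfr
            simp [this]
          · simp [hfr]
        · simp [hcx]

-- one sweep of port A: folding the current boundary into (nextBoundary, result, stopLoop)
theorem waveFold (origin : Int × Int) (ms : List (Int × Int)) (tr : List (List Bool))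
    (visited : PySem.Set (Int × Int)) :
    ∀ (ps : List (Int × Int)) (s0 : PySem.Set (Int × Int)) (res : List (Int × Int)) (b : Bool),
    ∀ out, out = ps.foldl (fun (st : PySem.Set (Int × Int) × List (Int × Int) × Bool) position =>
        let st := if (around origin).contains position then (st.1, st.2.1 ++ [position], true) else st
        (PySem.Set.union st.1 (boundary position ms tr visited), st.2.1, st.2.2)) (s0, res, b) →
    (∀ c, c ∈ out.1 ↔ c ∈ s0 ∨ ∃ p ∈ ps, c ∈ boundary p ms tr visited)
    ∧ out.2.1 = res ++ ps.filter (fun p => (around origin).contains p)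
    ∧ out.2.2 = (b || ps.any (fun p => (around origin).contains p))
    ∧ (s0.Nodup → out.1.Nodup) := by
  intro ps
  induction ps with
  | nil =>
    intro s0 res b out hout
    subst hout
    exact ⟨fun c => by simp, by simp, by simp, fun h => h⟩
  | cons x t ih =>
    intro s0 res b out hout
    rw [List.foldl_cons] at hout
    by_cases hx : (around origin).contains x = true
    · have hx' : x ∈ around origin := by simpa using hx
      simp only [hx, if_true] at hout
      obtain ⟨h1, h2, h3, h4⟩ := ih (PySem.Set.union s0 (boundary x ms tr visited))
        (res ++ [x]) true out hout
      refine ⟨?_, ?_, ?_, ?_⟩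
      · intro c
        rw [h1 c, PySem.Set.mem_union]
        constructor
        · rintro ((h | h) | ⟨p, hp, hb⟩)
          · exact Or.inl h
          · exact Or.inr ⟨x, List.mem_cons_self, h⟩
          · exact Or.inr ⟨p, List.mem_cons_of_mem _ hp, hb⟩
        · rintro (h | ⟨p, hp, hb⟩)
          · exact Or.inl (Or.inl h)
          · rcases List.mem_cons.mp hp with rfl | hp
            · exact Or.inl (Or.inr hb)
            · exact Or.inr ⟨p, hp, hb⟩
      · rw [h2, List.filter_cons, hx]
        simp
      · rw [h3, List.any_cons]
        simp [hx']
      · intro hs0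
        exact h4 (PySem.Set.nodup_union _ _ hs0)
    · have hx' : x ∉ around origin := by simpa using hx
      simp only [hx] at hout
      rw [if_neg (by simp)] at hout
      obtain ⟨h1, h2, h3, h4⟩ := ih (PySem.Set.union s0 (boundary x ms tr visited)) res b out hout
      refine ⟨?_, ?_, ?_, ?_⟩
      · intro c
        rw [h1 c, PySem.Set.mem_union]
        constructor
        · rintro ((h | h) | ⟨p, hp, hb⟩)
          · exact Or.inl h
          · exact Or.inr ⟨x, List.mem_cons_self, h⟩
          · exact Or.inr ⟨p, List.mem_cons_of_mem _ hp, hb⟩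
        · rintro (h | ⟨p, hp, hb⟩)
          · exact Or.inl (Or.inl h)
          · rcases List.mem_cons.mp hp with rfl | hp
            · exact Or.inl (Or.inr hb)
            · exact Or.inr ⟨p, hp, hb⟩
      · rw [h2, List.filter_cons]
        simp [hx']
      · rw [h3, List.any_cons]
        simp [hx']
      · intro hs0
        exact h4 (PySem.Set.nodup_union _ _ hs0)

-- port B's loop fills the distance map with exactly the layer indices
theorem altLoop_spec (dst : Int × Int) (ms : List (Int × Int)) (tr : List (List Bool)) :
    ∀ (fuel k : Nat) (dist : PySem.Dict (Int × Int) Int) (frontier : List (Int × Int)),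
    (∀ c, c ∈ frontier ↔ c ∈ Lm dst ms tr k) →
    (∀ c v, dist.get? c = some v ↔ ∃ j ≤ k, c ∈ Lm dst ms tr j ∧ v = (j : Int)) →
    Lm dst ms tr (k + fuel) = ∅ →
    ∀ c v, (backtrackAltLoop ms tr fuel dist frontier (k : Int)).get? c = some v ↔
      ∃ j, c ∈ Lm dst ms tr j ∧ v = (j : Int) := by
  intro fuel
  induction fuel with
  | zero =>
    intro k dist frontier hfr hget hL c v
    rw [show backtrackAltLoop ms tr 0 dist frontier (k : Int) = dist from rfl, hget c v]
    constructor
    · rintro ⟨j, _, hc, hv⟩; exact ⟨j, hc, hv⟩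
    · rintro ⟨j, hc, hv⟩
      refine ⟨j, ?_, hc, hv⟩
      by_contra hj
      rw [L_empty_mono dst ms tr hL (by omega)] at hc
      exact absurd hc (by simp)
  | succ fuel ih =>
    intro k dist frontier hfr hget hL c v
    simp only [backtrackAltLoop]
    by_cases hemp : frontier.isEmpty = true
    · rw [if_pos hemp, hget c v]
      have hLk : Lm dst ms tr k = ∅ := by
        rw [List.isEmpty_iff] at hemp
        subst hemp
        ext x
        simp [← hfr x]
      constructor
      · rintro ⟨j, _, hc, hv⟩; exact ⟨j, hc, hv⟩
      · rintro ⟨j, hc, hv⟩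
        refine ⟨j, ?_, hc, hv⟩
        by_contra hj
        rw [L_empty_mono dst ms tr hLk (by omega)] at hc
        exact absurd hc (by simp)
    · rw [if_neg hemp]
      rw [← List.foldl_flatMap]
      obtain ⟨hget', hmem', hnd', hsub'⟩ := distFold ms tr ((k : Int) + 1) (frontier.flatMap around)
        dist [] (by simp) List.nodup_nil _ rfl
      have hcond : ∀ x, (x ∈ frontier.flatMap around ∧ cellFree ms tr x = true ∧ dist.get? x = none)
          ↔ x ∈ Lm dst ms tr (k + 1) := by
        intro x
        rw [L_succ_eq, Finset.mem_sdiff, Finset.mem_filter]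
        have hnone : dist.get? x = none ↔ x ∉ Sm dst ms tr k := by
          constructor
          · intro hn hx
            obtain ⟨j, hj, hxj⟩ := (mem_S_iff dst ms tr k x).mp hx
            have := (hget x (j : Int)).mpr ⟨j, hj, hxj, rfl⟩
            rw [hn] at this; simp at this
          · intro hx
            rcases ho : dist.get? x with _ | w
            · rfl
            · obtain ⟨j, hj, hxj, _⟩ := (hget x w).mp ho
              exact absurd ((mem_S_iff dst ms tr k x).mpr ⟨j, hj, hxj⟩) hx
        rw [List.mem_flatMap, hnone]
        constructor
        · rintro ⟨⟨p, hp, hap⟩, hfree, hns⟩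
          refine ⟨⟨?_, hfree⟩, hns⟩
          simp only [nbrsF, Finset.mem_biUnion, List.mem_toFinset]
          exact ⟨p, (hfr p).mp hp, hap⟩
        · rintro ⟨⟨hnb, hfree⟩, hns⟩
          simp only [nbrsF, Finset.mem_biUnion, List.mem_toFinset] at hnb
          obtain ⟨p, hp, hap⟩ := hnb
          exact ⟨⟨p, (hfr p).mpr hp, hap⟩, hfree, hns⟩
      have hfr2 : ∀ x, x ∈ (List.foldl (fun (st : PySem.Dict (Int × Int) Int × List (Int × Int)) nb =>
          if !st.1.contains nb && terrainAt tr nb && !(ms.contains nb)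
          then (st.1.insert nb ((k : Int) + 1), st.2 ++ [nb]) else st) (dist, []) (frontier.flatMap around)).2 ↔
          x ∈ Lm dst ms tr (k + 1) := by
        intro x
        rw [hmem' x]
        simp only [List.not_mem_nil, false_or]
        exact hcond x
      have hget2 : ∀ x v, (List.foldl (fun (st : PySem.Dict (Int × Int) Int × List (Int × Int)) nb =>
          if !st.1.contains nb && terrainAt tr nb && !(ms.contains nb)
          then (st.1.insert nb ((k : Int) + 1), st.2 ++ [nb]) else st) (dist, []) (frontier.flatMap around)).1.get? x = some v ↔
          ∃ j ≤ k + 1, x ∈ Lm dst ms tr j ∧ v = (j : Int) := by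
        intro x w
        rw [hget' x]
        by_cases hx : x ∈ Lm dst ms tr (k + 1)
        · rw [if_pos ((hcond x).mpr hx)]
          constructor
          · intro h
            have hw : w = (k : Int) + 1 := by
              simpa using h.symm
            exact ⟨k + 1, le_rfl, hx, by push_cast; omega⟩
          · rintro ⟨j, hj, hxj, rfl⟩
            have : j = k + 1 := L_disjoint dst ms tr hxj hx
            subst this
            simp only [Option.some.injEq]
            push_cast
            ring
        · rw [if_neg (fun h => hx ((hcond x).mp h)), hget x w]
          constructor
          · rintro ⟨j, hj, hxj, hv⟩; exact ⟨j, by omega, hxj, hv⟩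
          · rintro ⟨j, hj, hxj, hv⟩
            refine ⟨j, ?_, hxj, hv⟩
            rcases Nat.lt_or_ge j (k + 1) with h | h
            · omega
            · have : j = k + 1 := by omega
              subst this
              exact absurd hxj hx
      have := ih (k + 1) _ _ hfr2 hget2 (by rw [show k + 1 + fuel = k + (fuel + 1) from by omega]; exact hL) c v
      rw [show ((k : Int) + 1) = ((k + 1 : Nat) : Int) from by push_cast; ring] at *
      exact this

-- port A's loop stops at the first wave containing an origin-adjacent cell and returns
-- exactly the origin-adjacent cells of the hitting layer
theorem loopA_spec (origin dst : Int × Int) (ms : List (Int × Int)) (tr : List (List Bool))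
    (k0 : Nat)
    (hhit : ∃ c ∈ around origin, c ∈ Lm dst ms tr k0)
    (hmin : ∀ j < k0, ∀ c ∈ around origin, c ∉ Lm dst ms tr j) :
    ∀ (fuel k : Nat) (visited nextB : PySem.Set (Int × Int)) (dz : Int) (res : List (Int × Int)),
    visited.Nodup → nextB.Nodup →
    (∀ c, c ∈ visited ↔ c ∈ Sm dst ms tr k) →
    (∀ c, c ∈ Lm dst ms tr (k + 1) → c ∈ nextB) →
    (∀ c, c ∈ nextB → c ∈ Lm dst ms tr (k + 1) ∨ c ∈ Lm dst ms tr k) →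
    k < k0 → k0 ≤ k + fuel →
    ∃ w, backtrackLoop origin ms tr fuel visited nextB dz res = res ++ w ∧
      (∀ c, c ∈ w ↔ c ∈ around origin ∧ c ∈ Lm dst ms tr k0) := by
  intro fuel
  induction fuel with
  | zero => intro k _ _ _ _ _ _ _ _ _ hk hk0; omega
  | succ fuel ih =>
    intro k visited nextB dz res hvnd hbnd hvis hlow hup hk hk0
    have hLk1 : (Lm dst ms tr (k + 1)).Nonempty := by
      obtain ⟨c0, _, hc0⟩ := hhit
      exact L_nonempty_of_le dst ms tr ⟨c0, hc0⟩ (by omega)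
    have hemp : nextB.isEmpty = false := by
      obtain ⟨c0, hc0⟩ := hLk1
      rcases h : nextB.isEmpty with _ | _
      · rfl
      · rw [List.isEmpty_iff] at h
        have := hlow c0 hc0
        rw [h] at this
        exact absurd this (by simp)
    simp only [backtrackLoop, hemp, Bool.false_eq_true, if_false]
    obtain ⟨h1, h2, h3, h4⟩ := waveFold origin ms tr visited nextB PySem.Set.empty res false _ rfl
    have hwave : ∀ c, c ∈ nextB → c ∈ around origin → c ∈ Lm dst ms tr k0 := by
      intro c hc hca
      rcases hup c hc with h | h
      · rcases Nat.lt_or_ge (k + 1) k0 with hlt | hge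
        · exact absurd h (hmin (k + 1) hlt c hca)
        · have : k + 1 = k0 := by omega
          exact this ▸ h
      · exact absurd h (hmin k (by omega) c hca)
    by_cases hstop : (k + 1) = k0
    · have hb : nextB.any (fun p => (around origin).contains p) = true := by
        obtain ⟨c0, hc0a, hc0⟩ := hhit
        rw [List.any_eq_true]
        refine ⟨c0, hlow c0 (hstop ▸ hc0), by simpa using hc0a⟩
      rw [h3]
      simp only [Bool.false_or, hb, eq_self_iff_true, if_true]
      refine ⟨nextB.filter (fun p => (around origin).contains p), h2, ?_⟩
      intro c
      rw [List.mem_filter]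
      constructor
      · rintro ⟨hc, hca⟩
        have hca' : c ∈ around origin := by simpa using hca
        exact ⟨hca', hwave c hc hca'⟩
      · rintro ⟨hca, hc⟩
        exact ⟨hlow c (hstop ▸ hc), by simpa using hca⟩
    · have hnone : ∀ c ∈ nextB, c ∉ around origin := by
        intro c hc hca
        rcases hup c hc with h | h
        · exact hmin (k + 1) (by omega) c hca h
        · exact hmin k (by omega) c hca h
      have hb : nextB.any (fun p => (around origin).contains p) = false := by
        rw [List.any_eq_false]
        intro c hc
        simp only [List.contains_eq_mem, decide_eq_true_eq]
        exact hnone c hc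
      rw [h3]
      simp only [Bool.false_or, hb, Bool.false_eq_true, if_false]
      have hres : nextB.filter (fun p => (around origin).contains p) = [] := by
        rw [List.filter_eq_nil_iff]
        intro c hc
        simp only [List.contains_eq_mem, decide_eq_true_eq]
        exact hnone c hc
      rw [h2, hres, List.append_nil]
      have hup' : ∀ c, c ∈ (List.foldl (fun (st : PySem.Set (Int × Int) × List (Int × Int) × Bool) position =>
          let st := if (around origin).contains position then (st.1, st.2.1 ++ [position], true) else st
          (PySem.Set.union st.1 (boundary position ms tr visited), st.2.1, st.2.2)) (PySem.Set.empty, res, false) nextB).1 →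
          c ∈ Lm dst ms tr (k + 1 + 1) ∨ c ∈ Lm dst ms tr (k + 1) := by
        intro c hcmem
        rw [h1 c] at hcmem
        simp only [PySem.Set.empty, List.not_mem_nil, false_or] at hcmem
        obtain ⟨p, hp, hb2⟩ := hcmem
        rw [mem_boundary] at hb2
        obtain ⟨hcap, hfree, hcv⟩ := hb2
        rw [hvis c] at hcv
        have hpS : p ∈ Sm dst ms tr (k + 1) := by
          rcases hup p hp with h | h
          · exact L_subset_S dst ms tr (k+1) h
          · exact S_mono dst ms tr (by omega) (L_subset_S dst ms tr k h)
        have hcS2 : c ∈ Sm dst ms tr (k + 1 + 1) := mem_S_succ dst ms tr (k+1) hpS hcap hfree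
        by_cases hcS1 : c ∈ Sm dst ms tr (k + 1)
        · refine Or.inr ?_
          rw [S_succ_eq_union_L, Finset.mem_union] at hcS1
          rcases hcS1 with h | h
          · exact absurd h hcv
          · exact h
        · exact Or.inl (Finset.mem_sdiff.mpr ⟨hcS2, hcS1⟩)
      have hlow' : ∀ c, c ∈ Lm dst ms tr (k + 1 + 1) →
          c ∈ (List.foldl (fun (st : PySem.Set (Int × Int) × List (Int × Int) × Bool) position =>
          let st := if (around origin).contains position then (st.1, st.2.1 ++ [position], true) else st
          (PySem.Set.union st.1 (boundary position ms tr visited), st.2.1, st.2.2)) (PySem.Set.empty, res, false) nextB).1 := by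
        intro c h
        rw [h1 c]
        simp only [PySem.Set.empty, List.not_mem_nil, false_or]
        rw [L_succ_eq, Finset.mem_sdiff, Finset.mem_filter] at h
        obtain ⟨⟨hnb, hfree⟩, hns⟩ := h
        simp only [nbrsF, Finset.mem_biUnion, List.mem_toFinset] at hnb
        obtain ⟨p, hp, hap⟩ := hnb
        refine ⟨p, hlow p hp, ?_⟩
        rw [mem_boundary]
        refine ⟨hap, hfree, ?_⟩
        rw [hvis c]
        intro hcS
        exact hns (S_mono dst ms tr (by omega) hcS)
      have hvis' : ∀ c, c ∈ PySem.Set.union visited nextB ↔ c ∈ Sm dst ms tr (k + 1) := by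
        intro c
        rw [PySem.Set.mem_union, hvis c, S_succ_eq_union_L, Finset.mem_union]
        constructor
        · rintro (h | h)
          · exact Or.inl h
          · rcases hup c h with h2 | h2
            · exact Or.inr h2
            · exact Or.inl (L_subset_S dst ms tr k h2)
        · rintro (h | h)
          · exact Or.inl h
          · exact Or.inr (hlow c h)
      exact ih (k + 1) (PySem.Set.union visited nextB) _ (dz + 1) res
        (PySem.Set.nodup_union _ _ hvnd) (h4 List.nodup_nil) hvis' hlow' hup'
        (by omega) (by omega)

theorem backtrack_spec : Claim_equal_backtrack := by
  intro origin destination monsters terrain hDom hPre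
  unfold Spec_backtrack
  unfold backtrack backtrack_alt
  by_cases hfast : (around origin).contains destination = true
  · simp only [hfast, if_true]
  · simp only [hfast, Bool.false_eq_true, if_false]
    rcases hPre with h | ⟨hPre1, hPre2⟩
    · exact absurd h hfast
    have hdadj : destination ∉ around origin := by simpa using hfast
    -- a hit layer exists
    obtain ⟨cr, hcr⟩ := List.any_eq_true.mp hPre2
    have hcrA : cr ∈ around origin := hcr.1
    have hcrR : cr ∈ reachSet destination monsters terrain := by
      have := hcr.2
      simpa using this
    have hcrS : cr ∈ Sm destination monsters terrain (gridFuel terrain) :=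
      (reach_iterate destination monsters terrain (gridFuel terrain) cr).mp hcrR
    obtain ⟨j0, hj0, hcrL⟩ := (mem_S_iff destination monsters terrain (gridFuel terrain) cr).mp hcrS
    have hP : ∃ k, ∃ c ∈ around origin, c ∈ Lm destination monsters terrain k := ⟨j0, cr, hcrA, hcrL⟩
    have hdec : DecidablePred (fun k => ∃ c ∈ around origin, c ∈ Lm destination monsters terrain k) :=
      fun k => List.decidableBEx _ _
    let k0 : Nat := @Nat.find _ hdec hP
    have hhit : ∃ c ∈ around origin, c ∈ Lm destination monsters terrain k0 := @Nat.find_spec _ hdec hP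
    have hmin : ∀ j < k0, ∀ c ∈ around origin, c ∉ Lm destination monsters terrain j := by
      intro j hj c hc hcl
      exact @Nat.find_min _ hdec hP j hj ⟨c, hc, hcl⟩
    have hk0pos : 0 < k0 := by
      rcases Nat.eq_zero_or_pos k0 with h0 | h
      · obtain ⟨c, hc, hcl⟩ := hhit
        rw [h0] at hcl
        have : c = destination := by
          simpa [Lm] using hcl
        exact absurd (this ▸ hc) hdadj
      · exact h
    have hk0lt : k0 < gridFuel terrain - 1 := by
      by_contra hge
      obtain ⟨c, hc, hcl⟩ := hhit
      rw [L_empty_mono destination monsters terrain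
        (L_gridFuel_empty destination monsters terrain) (by omega)] at hcl
      exact absurd hcl (by simp)
    -- port A
    have hbchar : ∀ c, c ∈ boundary destination monsters terrain
        (PySem.Set.add PySem.Set.empty destination) ↔ c ∈ Lm destination monsters terrain 1 := by
      intro c
      rw [mem_boundary]
      rw [show (PySem.Set.add PySem.Set.empty destination) = [destination] from rfl]
      constructor
      · rintro ⟨hca, hfree, hcv⟩
        have hS1 : c ∈ Sm destination monsters terrain 1 :=
          mem_S_succ destination monsters terrain 0 (by simp [Sm]) hca hfree
        refine Finset.mem_sdiff.mpr ⟨hS1, ?_⟩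
        simp only [Sm, Finset.mem_singleton]
        simpa using hcv
      · intro hcl
        rw [L_succ_eq] at hcl
        obtain ⟨hin, hns⟩ := Finset.mem_sdiff.mp hcl
        rw [Finset.mem_filter] at hin
        obtain ⟨hnb, hfree⟩ := hin
        simp only [nbrsF, Finset.mem_biUnion, List.mem_toFinset, Lm, Finset.mem_singleton] at hnb
        obtain ⟨p, rfl, hap⟩ := hnb
        refine ⟨hap, hfree, ?_⟩
        simp only [Sm, Finset.mem_singleton] at hns
        simpa using hns
    obtain ⟨w, hw, hwmem⟩ := loopA_spec origin destination monsters terrain k0 hhit hmin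
      (gridFuel terrain) 0 (PySem.Set.add PySem.Set.empty destination)
      (boundary destination monsters terrain (PySem.Set.add PySem.Set.empty destination)) 0 []
      (by rw [show (PySem.Set.add PySem.Set.empty destination) = [destination] from rfl]; simp)
      (nodup_boundary _ _ _ _)
      (by intro c
          rw [show (PySem.Set.add PySem.Set.empty destination) = [destination] from rfl]
          simp [Sm])
      (fun c hc => (hbchar c).mpr hc)
      (fun c hc => Or.inl ((hbchar c).mp hc))
      hk0pos (by omega)
    rw [hw, List.nil_append]
    -- port B
    have hdist := altLoop_spec destination monsters terrain (gridFuel terrain) 0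
      ((PySem.Dict.empty).insert destination 0) [destination]
      (by intro c; simp [Lm])
      (by intro c v
          rw [PySem.Dict.get?_insert]
          constructor
          · intro h
            split_ifs at h with hc
            · subst hc
              refine ⟨0, le_rfl, by simp [Lm], ?_⟩
              simpa using h.symm
            · rw [PySem.Dict.get?_empty] at h
              exact absurd h (by simp)
          · rintro ⟨j, hj, hcl, rfl⟩
            interval_cases j
            have : c = destination := by simpa [Lm] using hcl
            subst this
            simp)
      (by rw [Nat.zero_add]
          exact L_empty_mono destination monsters terrain
            (L_gridFuel_empty destination monsters terrain) (by omega))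
    rw [show ((0 : Nat) : Int) = (0 : Int) from rfl] at hdist
    set distF := backtrackAltLoop monsters terrain (gridFuel terrain)
      ((PySem.Dict.empty).insert destination 0) [destination] 0 with hdistF
    have hcontains : ∀ c, distF.contains c = true ↔ ∃ j, c ∈ Lm destination monsters terrain j := by
      intro c
      constructor
      · intro h
        rcases ho : distF.get? c with _ | v
        · rw [PySem.Dict.get?_eq_none_iff_contains] at ho
          rw [h] at ho; exact absurd ho (by simp)
        · obtain ⟨j, hcl, _⟩ := (hdist c v).mp ho
          exact ⟨j, hcl⟩
      · rintro ⟨j, hcl⟩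
        have := (hdist c (j : Int)).mpr ⟨j, hcl, rfl⟩
        rcases ho : distF.contains c with _ | _
        · rw [← PySem.Dict.get?_eq_none_iff_contains] at ho
          rw [ho] at this; exact absurd this (by simp)
        · rfl
    have hcand : ∀ c, c ∈ (around origin).filter (fun c => distF.contains c) ↔
        c ∈ around origin ∧ ∃ j, c ∈ Lm destination monsters terrain j := by
      intro c
      rw [List.mem_filter]
      exact and_congr_right (fun _ => hcontains c)
    have hgetD : ∀ c j, c ∈ Lm destination monsters terrain j → distF.getD c 0 = (j : Int) := by
      intro c j hcl
      rw [PySem.Dict.getD_eq_get?_getD, (hdist c (j : Int)).mpr ⟨j, hcl, rfl⟩]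
      rfl
    obtain ⟨c0, hc0A, hc0L⟩ := hhit
    have hc0cand : c0 ∈ (around origin).filter (fun c => distF.contains c) :=
      (hcand c0).mpr ⟨hc0A, k0, hc0L⟩
    have hbest : (PySem.List.min? (((around origin).filter (fun c => distF.contains c)).map
        (fun c => distF.getD c 0)) (fun v => v)).getD 0 = (k0 : Int) := by
      have hne : (((around origin).filter (fun c => distF.contains c)).map
          (fun c => distF.getD c 0)) ≠ [] := by
        intro h
        rw [List.map_eq_nil_iff] at h
        rw [h] at hc0cand
        exact absurd hc0cand (by simp)
      rcases hm : PySem.List.min? (((around origin).filter (fun c => distF.contains c)).map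
          (fun c => distF.getD c 0)) (fun v => v) with _ | m
      · rw [PySem.List.min?_eq_none_iff] at hm
        exact absurd hm hne
      have hmm := PySem.List.min?_mem hm
      have hmin' := PySem.List.min?_isMin hm
      rw [List.mem_map] at hmm
      obtain ⟨c, hc, hcv⟩ := hmm
      obtain ⟨hcA, j, hcl⟩ := (hcand c).mp hc
      have hjge : k0 ≤ j := by
        by_contra hlt
        exact hmin j (by omega) c hcA hcl
      have hmj : m = (j : Int) := by
        rw [← hcv]
        exact hgetD c j hcl
      have hk0mem : (k0 : Int) ∈ (((around origin).filter (fun c => distF.contains c)).map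
          (fun c => distF.getD c 0)) :=
        List.mem_map.mpr ⟨c0, hc0cand, hgetD c0 k0 hc0L⟩
      have h1 : m ≤ (k0 : Int) := hmin' _ hk0mem
      have h2 : (k0 : Int) ≤ m := by
        rw [hmj]
        exact_mod_cast hjge
      simp only [Option.getD_some]
      omega
    rw [hbest]
    have hfilt : ∀ c, c ∈ ((around origin).filter (fun c => distF.contains c)).filter
        (fun c => distF.getD c 0 == (k0 : Int)) ↔
        c ∈ around origin ∧ c ∈ Lm destination monsters terrain k0 := by
      intro c
      rw [List.mem_filter]
      constructor
      · rintro ⟨hc, hbeq⟩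
        obtain ⟨hcA, j, hcl⟩ := (hcand c).mp hc
        have hj : (j : Int) = (k0 : Int) := by
          rw [← hgetD c j hcl]
          exact eq_of_beq hbeq
        have : j = k0 := by exact_mod_cast hj
        exact ⟨hcA, this ▸ hcl⟩
      · rintro ⟨hcA, hcl⟩
        refine ⟨(hcand c).mpr ⟨hcA, k0, hcl⟩, ?_⟩
        rw [hgetD c k0 hcl]
        simp
    have hwne : w ≠ [] := by
      intro h
      have := (hwmem c0).mpr ⟨hc0A, hc0L⟩
      rw [h] at this
      exact absurd this (by simp)
    exact congrArg (fun o => Option.getD o (0, 0))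
      (min2?_congr w (((around origin).filter (fun c => distF.contains c)).filter
        (fun c => distF.getD c 0 == (k0 : Int)))
        (fun c => by rw [hwmem c, hfilt c]) hwne)
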